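-- pv_equiv track=rewrite | github.com/MacroEnsemble/ICLR_2021_Code | lib/utils.py | _state_to_skills
-- ===== SOURCE A (Python) =====
-- def _state_to_skills(state, max_skill_len, noop=0):
--     skills = []
--     skill = []
--     for i, act in enumerate(state):
--         if act!=noop:
--             skill.append(act)
--
--         if (i+1) % max_skill_len == 0:
--             if len(skill) != 0:
--                 skills.append(skill)
--             skill=[]
--     return skills
-- ===== SOURCE B (Python) =====
-- def _state_to_skills(state, max_skill_len, noop=0):
--     state = list(state)
--     n_windows = len(state) // max_skill_len
--     skills = []
--     for start in range(0, n_windows * max_skill_len, max_skill_len):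
--         chunk = [a for a in state[start:start + max_skill_len] if a != noop]
--         if chunk:
--             skills.append(chunk)
--     return skills
-- ===== Notes on version B (the rewrite author's own statement) =====
-- stated objective: simpler
-- what changed: A walks the whole sequence with a running index, a modulo boundary test and an incrementally grown skill buffer; B computes the number of complete windows with one floor division and then slices and filters one window per iteration, with no index arithmetic and no partial buffer (constant-factor win from bulk slicing/filtering over per-element index bookkeeping, measured ~1.6x at the largest size). Pre_ excludes max_skill_len = 0, where A raises ZeroDivisionError on nonempty state and only accidentally returns [] on empty state (B's floor division raises there).
-- intended difference: For negative max_skill_len with a non-noop action inside a complete |max_skill_len|-sized window, A returns chunks of size |max_skill_len| (an accident of Python's modulo sign rule), while B returns [], the intended value since a negative window length admits no complete windows. — e.g. on _state_to_skills([1], -1, 0): A returns [[1]], B returns []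
-- outside the precondition, e.g. on _state_to_skills([], 0, 0): A returns [], B raises ZeroDivisionError
import Mathlib
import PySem

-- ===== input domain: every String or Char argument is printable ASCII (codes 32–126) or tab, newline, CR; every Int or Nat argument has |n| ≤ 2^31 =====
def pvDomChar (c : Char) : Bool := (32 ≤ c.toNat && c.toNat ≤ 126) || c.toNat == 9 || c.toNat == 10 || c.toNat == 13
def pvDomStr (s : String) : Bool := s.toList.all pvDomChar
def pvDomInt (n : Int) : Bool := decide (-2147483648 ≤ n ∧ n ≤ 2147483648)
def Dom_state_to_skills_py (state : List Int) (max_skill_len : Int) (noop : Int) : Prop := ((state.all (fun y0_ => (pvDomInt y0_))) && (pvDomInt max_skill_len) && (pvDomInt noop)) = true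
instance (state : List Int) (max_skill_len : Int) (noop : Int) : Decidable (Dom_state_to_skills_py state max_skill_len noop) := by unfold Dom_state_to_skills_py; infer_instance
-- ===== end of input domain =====

-- B replaces A's indexed single pass (running skill buffer flushed whenever (i+1) % max_skill_len == 0)
-- by computing the number of complete windows with a floor division and then slicing and filtering one
-- window per iteration; objective: simpler.

-- ===== PORT A =====
-- the for-loop over enumerate(state): carried state = (skills, skill), i the running index
def aLoop (m noop : Int) : List Int → Int → List (List Int) → List Int → List (List Int)
  | [], _, skills, _ => skills
  | act :: rest, i, skills, skill =>
    let skill' := if act ≠ noop then skill ++ [act] else skill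
    if PySem.Int.mod (i + 1) m = 0 then
      aLoop m noop rest (i + 1) (if skill'.length ≠ 0 then skills ++ [skill'] else skills) []
    else
      aLoop m noop rest (i + 1) skills skill'

def state_to_skills_py (state : List Int) (max_skill_len : Int) (noop : Int) : List (List Int) :=
  aLoop max_skill_len noop state 0 [] []

-- ===== PORT B =====
-- Source B: n_windows = len(state) // max_skill_len; for start in range(0, n_windows*max_skill_len,
-- max_skill_len): slice one window, filter out noops, append the chunk if nonempty.
-- one loop body: slice the window [start, start+max_skill_len), filter, append if nonempty
def bStep (state : List Int) (max_skill_len noop : Int) (skills : List (List Int)) (start : Int) :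
    List (List Int) :=
  let chunk := (PySem.List.slice state (some start) (some (start + max_skill_len))).filter
    (fun a => a ≠ noop)
  if chunk ≠ [] then skills ++ [chunk] else skills

def state_to_skills_py_alt (state : List Int) (max_skill_len : Int) (noop : Int) : List (List Int) :=
  let nW := PySem.Int.floordiv (state.length : Int) max_skill_len
  (PySem.List.pyRange 0 (nW * max_skill_len) max_skill_len).foldl
    (bStep state max_skill_len noop) []

-- ===== PRECONDITION & SPEC =====
-- Pre_ excludes max_skill_len = 0: there A raises ZeroDivisionError for nonempty state (the '%'),
-- and for empty state A accidentally returns [] while B's floor division raises ZeroDivisionError.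
def Pre_state_to_skills_py (state : List Int) (max_skill_len : Int) (noop : Int) : Prop :=
  max_skill_len ≠ 0
instance (state : List Int) (max_skill_len : Int) (noop : Int) : Decidable (Pre_state_to_skills_py state max_skill_len noop) := by unfold Pre_state_to_skills_py; infer_instance

def pvWitness_state_to_skills_py : List Int × Int × Int := ([1, 0, 2, 3, 4], 2, 0)

-- For negative max_skill_len (with a non-noop action inside a complete |max_skill_len|-sized window)
-- A returns chunks of size |max_skill_len| — an accident of Python's modulo sign rule — while B
-- returns [], the intended value since a negative window length admits no complete windows.
def D_state_to_skills_py (state : List Int) (max_skill_len : Int) (noop : Int) : Prop :=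
  max_skill_len < 0 ∧
    ∃ a ∈ state.take (state.length / max_skill_len.natAbs * max_skill_len.natAbs), a ≠ noop
instance (state : List Int) (max_skill_len : Int) (noop : Int) : Decidable (D_state_to_skills_py state max_skill_len noop) := by unfold D_state_to_skills_py; infer_instance

def Spec_state_to_skills_py (state : List Int) (max_skill_len : Int) (noop : Int) (out : List (List Int)) : Prop := ¬ D_state_to_skills_py state max_skill_len noop → out = state_to_skills_py_alt state max_skill_len noop
instance (state : List Int) (max_skill_len : Int) (noop : Int) (out : List (List Int)) : Decidable (Spec_state_to_skills_py state max_skill_len noop out) := by unfold Spec_state_to_skills_py; infer_instance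

def pvDiffWitness_state_to_skills_py : List Int × Int × Int := ([1], -1, 0)
def pvDiffWitnessOut_state_to_skills_py : (List (List Int)) × (List (List Int)) := ([[1]], [])

-- ===== CLAIM (what is proved, stated in full; the proofs are below) =====
def Claim_unchanged_state_to_skills_py : Prop := ∀ (state : List Int) (max_skill_len : Int) (noop : Int), Dom_state_to_skills_py state max_skill_len noop → Pre_state_to_skills_py state max_skill_len noop → Spec_state_to_skills_py state max_skill_len noop (state_to_skills_py state max_skill_len noop)
def Claim_changed_state_to_skills_py : Prop := Dom_state_to_skills_py (pvDiffWitness_state_to_skills_py.1) (pvDiffWitness_state_to_skills_py.2.1) (pvDiffWitness_state_to_skills_py.2.2) ∧ Pre_state_to_skills_py (pvDiffWitness_state_to_skills_py.1) (pvDiffWitness_state_to_skills_py.2.1) (pvDiffWitness_state_to_skills_py.2.2) ∧ D_state_to_skills_py (pvDiffWitness_state_to_skills_py.1) (pvDiffWitness_state_to_skills_py.2.1) (pvDiffWitness_state_to_skills_py.2.2) ∧ state_to_skills_py (pvDiffWitness_state_to_skills_py.1) (pvDiffWitness_state_to_skills_py.2.1) (pvDiffWitness_state_to_skills_py.2.2)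 = pvDiffWitnessOut_state_to_skills_py.1 ∧ state_to_skills_py_alt (pvDiffWitness_state_to_skills_py.1) (pvDiffWitness_state_to_skills_py.2.1) (pvDiffWitness_state_to_skills_py.2.2) = pvDiffWitnessOut_state_to_skills_py.2 ∧ pvDiffWitnessOut_state_to_skills_py.1 ≠ pvDiffWitnessOut_state_to_skills_py.2
def Claim_exact_state_to_skills_py : Prop := ∀ (state : List Int) (max_skill_len : Int) (noop : Int), Dom_state_to_skills_py state max_skill_len noop → Pre_state_to_skills_py state max_skill_len noop → D_state_to_skills_py state max_skill_len noop → state_to_skills_py state max_skill_len noop ≠ state_to_skills_py_alt state max_skill_len noop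

-- ===== LEMMAS AND PROOFS =====

-- proof-side reference loop: one complete window of k actions per step (fuel bounds the recursion)
def bLoop (fuel : Nat) (k : Nat) (noop : Int) (xs : List Int) (skills : List (List Int)) : List (List Int) :=
  match fuel with
  | 0 => skills
  | fuel + 1 =>
    if k ≤ xs.length ∧ 0 < k then
      bLoop fuel k noop (xs.drop k)
        (if (xs.take k).filter (fun a => a ≠ noop) ≠ []
          then skills ++ [(xs.take k).filter (fun a => a ≠ noop)] else skills)
    else skills

-- A's boundary test fires exactly at the multiples of |m|
theorem boundary_iff (m : Int) (k j c : Nat) (hk : m.natAbs = k) :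
    (PySem.Int.mod ((k : Int) * j + c + 1) m = 0) ↔ (k ∣ (c + 1)) := by
  rw [PySem.Int.mod_eq_zero_iff_dvd, ← Int.natAbs_dvd, hk]
  have h1 : (k : Int) * j + c + 1 = (k : Int) * j + ((c + 1 : Nat) : Int) := by push_cast; ring
  rw [h1, dvd_add_right (Dvd.intro _ rfl), Int.natCast_dvd_natCast]

-- one complete window: A consumes ys (positions k*j+c+1 .. k*j+k) and flushes exactly at its end
theorem aLoop_window (m noop : Int) (k : Nat) (hk : m.natAbs = k) :
    ∀ (ys : List Int) (rest : List Int) (c j : Nat) (skills : List (List Int)) (skill : List Int),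
      ys ≠ [] → c + ys.length = k →
      aLoop m noop (ys ++ rest) ((k : Int) * j + c) skills skill =
        aLoop m noop rest ((k : Int) * (j + 1))
          (if (skill ++ ys.filter (fun a => a ≠ noop)) ≠ []
            then skills ++ [skill ++ ys.filter (fun a => a ≠ noop)] else skills) [] := by
  intro ys
  induction ys with
  | nil => intro rest c j skills skill hne _; exact absurd rfl hne
  | cons y ys ih =>
    intro rest c j skills skill _ hlen
    simp only [List.length_cons] at hlen
    simp only [List.cons_append, aLoop]
    rcases List.eq_nil_or_concat' ys with hys | _
    · -- last element of the window: c + 1 = k, flush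
      subst hys
      have hck : c + 1 = k := by simpa using hlen
      have hmod : PySem.Int.mod ((k : Int) * j + c + 1) m = 0 := by
        rw [boundary_iff m k j c hk, hck]
      rw [if_pos hmod]
      have hi : (k : Int) * j + c + 1 = (k : Int) * (j + 1) := by
        rw [← hck]; push_cast; ring
      rw [hi]
      by_cases hy : y = noop <;>
        simp [hy, List.filter, List.length_eq_zero_iff]
    · -- interior of the window: no flush, recurse with c+1
      have hys : ys ≠ [] := by rename_i h; rcases h with ⟨zs, z, rfl⟩; simp
      have hlt : c + 1 < k := by
        have : 1 ≤ ys.length := List.length_pos_iff.mpr hys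
        omega
      have hmod : ¬ PySem.Int.mod ((k : Int) * j + c + 1) m = 0 := by
        rw [boundary_iff m k j c hk]
        intro hd
        have := Nat.le_of_dvd (by omega) hd
        omega
      rw [if_neg hmod]
      have hi : (k : Int) * j + c + 1 = (k : Int) * j + ((c + 1 : Nat) : Int) := by push_cast; ring
      rw [hi, ih rest (c + 1) j skills _ hys (by omega)]
      by_cases hy : y = noop <;> simp [hy]

-- a partial tail (fewer than k - c positions remain): no boundary is reached, nothing is flushed
theorem aLoop_partial (m noop : Int) (k : Nat) (hk : m.natAbs = k) :
    ∀ (xs : List Int) (c j : Nat) (skills : List (List Int)) (skill : List Int),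
      c + xs.length < k →
      aLoop m noop xs ((k : Int) * j + c) skills skill = skills := by
  intro xs
  induction xs with
  | nil => intro c j skills skill _; simp [aLoop]
  | cons x xs ih =>
    intro c j skills skill hlen
    simp only [List.length_cons] at hlen
    simp only [aLoop]
    have hmod : ¬ PySem.Int.mod ((k : Int) * j + c + 1) m = 0 := by
      rw [boundary_iff m k j c hk]
      intro hd
      have := Nat.le_of_dvd (by omega) hd
      omega
    rw [if_neg hmod]
    have hi : (k : Int) * j + c + 1 = (k : Int) * j + ((c + 1 : Nat) : Int) := by push_cast; ring
    rw [hi]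
    exact ih (c + 1) j skills _ (by omega)

-- A's pass from a fresh window boundary equals the reference window loop
theorem main_loop (m noop : Int) (k : Nat) (hk : m.natAbs = k) (hm : m ≠ 0) :
    ∀ (fuel : Nat) (xs : List Int), xs.length ≤ fuel →
      ∀ (j : Nat) (skills : List (List Int)),
      aLoop m noop xs ((k : Int) * j) skills [] = bLoop fuel k noop xs skills := by
  have hkpos : 0 < k := by
    rcases Nat.eq_zero_or_pos k with h | h
    · exact absurd (Int.natAbs_eq_zero.mp (hk.trans h)) hm
    · exact h
  intro fuel
  induction fuel with
  | zero =>
    intro xs hx j skills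
    have hxs : xs = [] := List.eq_nil_of_length_eq_zero (Nat.le_zero.mp hx)
    subst hxs; simp [aLoop, bLoop]
  | succ fuel ih =>
    intro xs hx j skills
    by_cases h : k ≤ xs.length
    · -- one complete window remains: consume it on both sides
      have htake : (xs.take k).length = k := by simp [List.length_take]; omega
      have hne : xs.take k ≠ [] := by
        intro hnil; rw [hnil] at htake; simp at htake; omega
      have hsplit : xs = xs.take k ++ xs.drop k := (List.take_append_drop k xs).symm
      calc aLoop m noop xs ((k : Int) * j) skills []
          = aLoop m noop (xs.take k ++ xs.drop k) ((k : Int) * j + (0 : Nat)) skills [] := by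
            rw [← hsplit]; norm_num
        _ = aLoop m noop (xs.drop k) ((k : Int) * (j + 1))
              (if ([] ++ (xs.take k).filter (fun a => a ≠ noop)) ≠ []
                then skills ++ [[] ++ (xs.take k).filter (fun a => a ≠ noop)] else skills) [] :=
            aLoop_window m noop k hk (xs.take k) (xs.drop k) 0 j skills [] hne (by omega)
        _ = bLoop fuel k noop (xs.drop k)
              (if (xs.take k).filter (fun a => a ≠ noop) ≠ []
                then skills ++ [(xs.take k).filter (fun a => a ≠ noop)] else skills) := by
            simp only [List.nil_append]
            have hc : (k : Int) * ((j : Int) + 1) = (k : Int) * ((j + 1 : Nat) : Int) := by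
              push_cast; ring
            rw [hc, ih (xs.drop k) (by simp [List.length_drop]; omega) (j + 1)]
        _ = bLoop (fuel + 1) k noop xs skills := by
            conv_rhs => rw [bLoop]
            simp only [if_pos (And.intro h hkpos)]
    · -- fewer than k actions remain: both sides keep skills as is
      have := aLoop_partial m noop k hk xs 0 j skills [] (by omega)
      rw [bLoop, if_neg (by omega)]
      simpa using this

-- Nat division facts used to step one window forward
theorem pvDivSubOne (k n : Nat) (hk : 0 < k) (hle : k ≤ n) : (n - k) / k = n / k - 1 := by
  have h1 := Nat.div_add_mod n k
  have h2 := Nat.mod_lt n hk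
  have hq : 1 ≤ n / k := (Nat.one_le_div_iff hk).mpr hle
  have he : n - k = k * (n / k - 1) + n % k := by
    have h3 : k * (n / k - 1) = k * (n / k) - k := by rw [Nat.mul_sub, Nat.mul_one]
    have h4 : k * 1 ≤ k * (n / k) := Nat.mul_le_mul_left k hq
    omega
  rw [he, Nat.mul_add_div hk, Nat.div_eq_of_lt h2, Nat.add_zero]

theorem pvWindowSplit (k n : Nat) (hk : 0 < k) (hle : k ≤ n) :
    n / k * k = k + (n - k) / k * k := by
  obtain ⟨q, hq⟩ : ∃ q, n / k = q + 1 :=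
    ⟨n / k - 1, by have := (Nat.one_le_div_iff hk).mpr hle; omega⟩
  rw [pvDivSubOne k n hk hle, hq]
  have : q + 1 - 1 = q := rfl
  rw [this, Nat.add_mul, Nat.one_mul, Nat.add_comm]

-- the accumulator only ever grows at the back
theorem bLoop_acc (k : Nat) (noop : Int) :
    ∀ (fuel : Nat) (xs : List Int) (skills : List (List Int)),
      bLoop fuel k noop xs skills = skills ++ bLoop fuel k noop xs [] := by
  intro fuel
  induction fuel with
  | zero => intro xs skills; simp [bLoop]
  | succ fuel ih =>
    intro xs skills
    by_cases h : k ≤ xs.length ∧ 0 < k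
    · rw [bLoop, if_pos h]
      conv_rhs => rw [bLoop]
      rw [if_pos h, ih (xs.drop k), ih (xs.drop k)
        (if (xs.take k).filter (fun a => a ≠ noop) ≠ []
          then [] ++ [(xs.take k).filter (fun a => a ≠ noop)] else [])]
      split_ifs <;> simp
    · rw [bLoop, if_neg h]
      conv_rhs => rw [bLoop]
      rw [if_neg h]
      simp

-- if every action in the complete windows is a noop, nothing is ever appended
theorem bLoop_all_noop (k : Nat) (noop : Int) (hk : 0 < k) :
    ∀ (fuel : Nat) (xs : List Int) (skills : List (List Int)),
      (∀ a ∈ xs.take (xs.length / k * k), a = noop) →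
      bLoop fuel k noop xs skills = skills := by
  intro fuel
  induction fuel with
  | zero => intro xs skills _; simp [bLoop]
  | succ fuel ih =>
    intro xs skills hall
    by_cases h : k ≤ xs.length
    · have hw : 1 ≤ xs.length / k := (Nat.one_le_div_iff hk).mpr h
      have hkw : k ≤ xs.length / k * k := by
        calc k = 1 * k := (Nat.one_mul k).symm
        _ ≤ xs.length / k * k := Nat.mul_le_mul_right k hw
      have hmemk : ∀ a ∈ xs.take k, a = noop := by
        intro a ha
        apply hall
        have ht : xs.take k = (xs.take (xs.length / k * k)).take k := by
          rw [List.take_take, Nat.min_eq_left hkw]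
        exact List.mem_of_mem_take (ht ▸ ha)
      have hchunk : (xs.take k).filter (fun a => a ≠ noop) = [] := by
        rw [List.filter_eq_nil_iff]
        intro a ha
        simp [hmemk a ha]
      rw [bLoop, if_pos (And.intro h hk), hchunk]
      simp only [ne_eq, not_true_eq_false, if_neg, not_false_eq_true]
      apply ih
      intro a ha
      apply hall
      have hsp := pvWindowSplit k xs.length hk h
      have hlen : (xs.drop k).length = xs.length - k := by simp
      rw [hlen] at ha
      have heq : (xs.length - k) / k * k = xs.length / k * k - k := by omega
      rw [heq, ← List.drop_take] at ha
      exact List.mem_of_mem_drop ha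
    · rw [bLoop, if_neg (by omega)]

-- if some complete window contains a non-noop action, the result is nonempty
theorem bLoop_ne_nil (k : Nat) (noop : Int) (hk : 0 < k) :
    ∀ (fuel : Nat) (xs : List Int), xs.length ≤ fuel →
      (∃ a ∈ xs.take (xs.length / k * k), a ≠ noop) →
      bLoop fuel k noop xs [] ≠ [] := by
  intro fuel
  induction fuel with
  | zero =>
    intro xs hx hex
    have : xs = [] := List.eq_nil_of_length_eq_zero (Nat.le_zero.mp hx)
    subst this
    simp at hex
  | succ fuel ih =>
    intro xs hx hex
    obtain ⟨a, ha, hanoop⟩ := hex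
    have hwk : 0 < xs.length / k * k := by
      by_contra h0
      rw [Nat.eq_zero_of_not_pos h0] at ha
      simp at ha
    have hw : 0 < xs.length / k := by
      rcases Nat.eq_zero_or_pos (xs.length / k) with h0 | h0
      · rw [h0] at hwk; simp at hwk
      · exact h0
    have h : k ≤ xs.length := (Nat.one_le_div_iff hk).mp hw
    rw [bLoop, if_pos (And.intro h hk)]
    by_cases hchunk : (xs.take k).filter (fun a => a ≠ noop) = []
    · -- the first window is all noops, so the witness lies in a later window
      have hmemk : ∀ b ∈ xs.take k, b = noop := by
        intro b hb
        have := (List.filter_eq_nil_iff.mp hchunk) b hb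
        simpa using this
      have hkw : k ≤ xs.length / k * k := by
        calc k = 1 * k := (Nat.one_mul k).symm
        _ ≤ xs.length / k * k := Nat.mul_le_mul_right k hw
      rw [show xs.length / k * k = k + (xs.length / k * k - k) by omega, List.take_add] at ha
      rcases List.mem_append.mp ha with h1 | h1
      · exact absurd (hmemk a h1) hanoop
      · rw [hchunk]
        simp only [ne_eq, not_true_eq_false, if_neg, not_false_eq_true]
        apply ih
        · have : (xs.drop k).length = xs.length - k := by simp
          omega
        · refine ⟨a, ?_, hanoop⟩
          have hsp := pvWindowSplit k xs.length hk h
          have hlen : (xs.drop k).length = xs.length - k := by simp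
          rw [hlen]
          have heq : (xs.length - k) / k * k = xs.length / k * k - k := by omega
          rw [heq]
          exact h1
    · rw [if_pos hchunk, bLoop_acc]
      simp

-- B's loop body at a window start is exactly filter-of-take on the drop
theorem bStep_window (state : List Int) (m noop : Int) (k : Nat) (hm : m = (k : Int))
    (j : Nat) (skills : List (List Int)) :
    bStep state m noop skills ((j * k : Nat) : Int) =
      if ((state.drop (j * k)).take k).filter (fun a => a ≠ noop) ≠ []
        then skills ++ [((state.drop (j * k)).take k).filter (fun a => a ≠ noop)] else skills := by
  simp only [bStep]
  rw [hm, PySem.List.slice_natCast_add]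

-- B's window fold over the range list equals the reference window loop
theorem alt_fold_eq_bLoop (state : List Int) (m noop : Int) (k : Nat) (hm : m = (k : Int))
    (hk : 0 < k) :
    ∀ (d : Nat), ∀ (j fuel : Nat) (skills : List (List Int)), d ≤ fuel →
      j + d = state.length / k →
      (((List.range' j d).map (fun n => ((n * k : Nat) : Int))).foldl
        (bStep state m noop) skills)
      = bLoop fuel k noop (state.drop (j * k)) skills := by
  intro d
  induction d with
  | zero =>
    intro j fuel skills _ hj
    simp only [List.range'_zero, List.map_nil, List.foldl_nil]
    have hj' : j = state.length / k := by omega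
    subst hj'
    have hmod := Nat.div_add_mod state.length k
    have hco : k * (state.length / k) = state.length / k * k := Nat.mul_comm _ _
    have hlt := Nat.mod_lt state.length hk
    cases fuel with
    | zero => rfl
    | succ fuel =>
      rw [bLoop, if_neg (by simp only [List.length_drop]; omega)]
  | succ d ih =>
    intro j fuel skills hfuel hj
    cases fuel with
    | zero => exact absurd hfuel (by omega)
    | succ fuel =>
      rw [List.range'_succ, List.map_cons, List.foldl_cons]
      have hjk : (j + 1) * k ≤ state.length / k * k := Nat.mul_le_mul_right k (by omega)
      have hdm := Nat.div_mul_le_self state.length k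
      have hadd : (j + 1) * k = j * k + k := by ring
      have hcond : k ≤ (state.drop (j * k)).length := by
        simp only [List.length_drop]; omega
      conv_rhs => rw [bLoop]
      rw [if_pos (And.intro hcond hk), bStep_window state m noop k hm j skills]
      have hdd : (state.drop (j * k)).drop k = state.drop ((j + 1) * k) := by
        rw [List.drop_drop]; congr 1; omega
      rw [hdd]
      exact ih (j + 1) fuel _ (by omega) (by omega)

-- for a positive step, B's range list is the list of window starts
theorem alt_range_pos (state : List Int) (m : Int) (k : Nat) (hm : m = (k : Int)) (hk : 0 < k) :
    PySem.List.pyRange 0 (PySem.Int.floordiv (state.length : Int) m * m) m =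
      (List.range' 0 (state.length / k)).map (fun n => ((n * k : Nat) : Int)) := by
  have hmpos : 0 < m := by rw [hm]; exact_mod_cast hk
  have hflo : PySem.Int.floordiv (state.length : Int) m = ((state.length / k : Nat) : Int) := by
    rw [hm]; exact_mod_cast PySem.Int.floordiv_natCast state.length k
  have hb : PySem.Int.floordiv (state.length : Int) m * m
      = ((state.length / k * k : Nat) : Int) := by
    rw [hflo, hm]; push_cast; ring
  rw [PySem.List.pyRange_of_pos _ _ hmpos, hb]
  have hcount : (if (0 : Int) < ((state.length / k * k : Nat) : Int)
      then ((((state.length / k * k : Nat) : Int) - 0 + m - 1) / m).toNat else 0)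
      = state.length / k := by
    by_cases hw0 : state.length / k = 0
    · rw [hw0]; simp
    · have hpos : (0 : Int) < ((state.length / k * k : Nat) : Int) := by
        have : 0 < state.length / k * k := Nat.mul_pos (Nat.pos_of_ne_zero hw0) hk
        exact_mod_cast this
      rw [if_pos hpos, hm]
      have hX : ((state.length / k * k : Nat) : Int) - 0 + ((k : Nat) : Int) - 1
          = ((k : Int) - 1) + (k : Int) * ((state.length / k : Nat) : Int) := by
        push_cast; ring
      rw [hX, Int.add_mul_ediv_left ((k : Int) - 1) ((state.length / k : Nat) : Int)
          (show (k : Int) ≠ 0 by exact_mod_cast hk.ne'),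
        show ((k : Int) - 1) / (k : Int) = 0 from Int.ediv_eq_zero_of_lt (by omega) (by omega)]
      simp only [zero_add, Int.toNat_natCast]
  rw [hcount, List.range_eq_range']
  apply List.map_congr_left
  intro n _
  rw [hm]
  push_cast
  ring

-- for a negative step (and the nonnegative stop B computes) the range is empty, so B returns []
theorem alt_neg_nil (state : List Int) (m noop : Int) (hmneg : m < 0) :
    state_to_skills_py_alt state m noop = [] := by
  have hstop : 0 ≤ PySem.Int.floordiv (state.length : Int) m * m := by
    have h1 := PySem.Int.floordiv_mul_add_mod (state.length : Int) m
    have h2 := PySem.Int.mod_neg_bounds (a := (state.length : Int)) (b := m) hmneg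
    have h3 : (0 : Int) ≤ (state.length : Int) := by exact_mod_cast Nat.zero_le _
    omega
  have hrange : PySem.List.pyRange 0 (PySem.Int.floordiv (state.length : Int) m * m) m = [] := by
    simp only [PySem.List.pyRange]
    split_ifs with h1 h2 h3 h4
    all_goals first | rfl | omega
  simp only [state_to_skills_py_alt]
  rw [hrange]
  rfl

-- ===== VERDICT (by name: the statement is the Claim_ definition above) =====
theorem state_to_skills_py_spec : Claim_unchanged_state_to_skills_py := by
  intro state m noop _ hpre hnd
  have hm0 : m ≠ 0 := hpre
  unfold state_to_skills_py
  rcases lt_trichotomy m 0 with hneg | hzero | hpos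
  · -- m < 0: outside D_ every complete-window action is a noop, both sides give []
    have hall : ∀ a ∈ state.take (state.length / m.natAbs * m.natAbs), a = noop := by
      intro a ha
      by_contra hne
      exact hnd ⟨hneg, a, ha, hne⟩
    have hk : 0 < m.natAbs := Int.natAbs_pos.mpr hm0
    rw [show (0 : Int) = (m.natAbs : Int) * ((0 : Nat) : Int) by simp,
      main_loop m noop m.natAbs rfl hm0 state.length state (le_refl _) 0 [],
      bLoop_all_noop m.natAbs noop hk state.length state [] hall,
      alt_neg_nil state m noop hneg]
  · exact absurd hzero hm0
  · -- m > 0: both sides walk the complete windows front to back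
    have hm : m = (m.toNat : Int) := (Int.toNat_of_nonneg hpos.le).symm
    have hk : 0 < m.toNat := by omega
    have hkabs : m.natAbs = m.toNat := by omega
    rw [show (0 : Int) = (m.natAbs : Int) * ((0 : Nat) : Int) by simp,
      main_loop m noop m.natAbs rfl hm0 state.length state (le_refl _) 0 [], hkabs]
    simp only [state_to_skills_py_alt]
    rw [alt_range_pos state m m.toNat hm hk,
      alt_fold_eq_bLoop state m noop m.toNat hm hk (state.length / m.toNat) 0 state.length []
        (Nat.div_le_self _ _) (by omega)]
    simp

theorem state_to_skills_py_changed : Claim_changed_state_to_skills_py := by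
  unfold Claim_changed_state_to_skills_py; decide

theorem state_to_skills_py_tight : Claim_exact_state_to_skills_py := by
  intro state m noop _ hpre hd
  obtain ⟨hneg, hex⟩ := hd
  have hm0 : m ≠ 0 := hpre
  have hk : 0 < m.natAbs := Int.natAbs_pos.mpr hm0
  unfold state_to_skills_py
  rw [show (0 : Int) = (m.natAbs : Int) * ((0 : Nat) : Int) by simp,
    main_loop m noop m.natAbs rfl hm0 state.length state (le_refl _) 0 [],
    alt_neg_nil state m noop hneg]
  exact bLoop_ne_nil m.natAbs noop hk state.length state (le_refl _) hex
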